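-- pv_equiv track=rewrite | github.com/n3bch4S/algor-lab | lab03/6434439723lab03.py | spnCirLeft
-- ===== SOURCE A (Python) =====
-- PASSENGER = "P"
--
-- def spnCirLeft(arr, grb, k, selectedPassenger) :
--     n = len(arr)
--     drcts = [-1, 1]
--     for step in range(1, k):
--         for drct in drcts :
--             pnt = grb + step * drct
--             if pnt >= n or pnt < 0:
--                 continue
--             pick = arr[pnt].lower()
--             if pick == PASSENGER.lower() and pnt not in selectedPassenger :
--                 return pnt
--     return grb
-- ===== SOURCE B (Python) =====
-- def spnCirLeft(arr, grb, k, selectedPassenger):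
--     n = len(arr)
--     leftDist = None
--     for step in range(1, k):
--         pnt = grb - step
--         if pnt < 0:
--             break
--         if pnt < n and arr[pnt].lower() == "p" and pnt not in selectedPassenger:
--             leftDist = step
--             break
--     rightDist = None
--     for step in range(1, k):
--         pnt = grb + step
--         if pnt >= n:
--             break
--         if pnt >= 0 and arr[pnt].lower() == "p" and pnt not in selectedPassenger:
--             rightDist = step
--             break
--     if leftDist is not None and (rightDist is None or leftDist <= rightDist):
--         return grb - leftDist
--     if rightDist is not None:
--         return grb + rightDist
--     return grb
-- ===== Notes on version B (the rewrite author's own statement) =====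
-- stated objective: alternative
-- what changed: Replaced the interleaved outward expansion (one loop trying -1 then +1 at each distance) with two independent directional scans that each break as soon as the index leaves the array, combined at the end with a left-wins-on-tie rule.
import Mathlib
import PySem

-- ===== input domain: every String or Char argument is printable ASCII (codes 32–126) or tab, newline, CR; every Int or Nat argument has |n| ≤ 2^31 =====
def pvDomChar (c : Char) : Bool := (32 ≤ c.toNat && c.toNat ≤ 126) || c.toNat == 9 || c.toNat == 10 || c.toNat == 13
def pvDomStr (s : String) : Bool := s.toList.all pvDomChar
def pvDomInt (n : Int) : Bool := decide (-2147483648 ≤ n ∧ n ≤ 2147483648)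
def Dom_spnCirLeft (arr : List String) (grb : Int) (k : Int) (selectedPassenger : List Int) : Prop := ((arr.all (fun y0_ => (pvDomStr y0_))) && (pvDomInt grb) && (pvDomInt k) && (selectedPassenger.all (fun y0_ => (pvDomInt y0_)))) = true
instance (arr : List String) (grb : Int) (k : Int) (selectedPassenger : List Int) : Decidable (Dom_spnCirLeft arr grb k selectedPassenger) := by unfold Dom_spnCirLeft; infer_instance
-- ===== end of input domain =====

-- ===== PORT A =====
-- B replaces A's interleaved outward expansion by two independent directional scans with early break ("alternative").

-- inner `for drct in drcts` loop of A: returns the first position found, if any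
def spnCirLeftInner (arr : List String) (n grb : Int) (sel : List Int) (step : Int) :
    List Int → Option Int
  | [] => none
  | drct :: rest =>
    let pnt := grb + step * drct
    if pnt ≥ n ∨ pnt < 0 then spnCirLeftInner arr n grb sel step rest
    else
      match PySem.List.pyGet? arr pnt with
      | some s =>
        if PySem.Str.lower s == PySem.Str.lower "P" && !(sel.contains pnt) then some pnt
        else spnCirLeftInner arr n grb sel step rest
      | none => spnCirLeftInner arr n grb sel step rest

-- outer `for step in range(1, k)` loop of A; the Nat fuel ((k - step).toNat at each call)
-- only makes the recursion structural, the `step < k` test is the loop condition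
def spnCirLeftOuter (arr : List String) (n grb : Int) (sel : List Int) (k : Int) :
    Nat → Int → Option Int
  | 0, _ => none
  | fuel + 1, step =>
    if step < k then
      match spnCirLeftInner arr n grb sel step [-1, 1] with
      | some p => some p
      | none => spnCirLeftOuter arr n grb sel k fuel (step + 1)
    else none

def spnCirLeft (arr : List String) (grb : Int) (k : Int) (selectedPassenger : List Int) : Int :=
  let n : Int := arr.length
  (spnCirLeftOuter arr n grb selectedPassenger k (k - 1).toNat 1).getD grb

-- ===== PORT B =====
-- seat check shared by B's two scans
def spnCirLeftAltOk (arr : List String) (sel : List Int) (pnt : Int) : Bool :=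
  match PySem.List.pyGet? arr pnt with
  | some s => PySem.Str.lower s == "p" && !(sel.contains pnt)
  | none => false

-- B's leftward scan: first step whose seat grb - step is a free passenger; breaks below 0
def spnCirLeftAltLeft (arr : List String) (n grb : Int) (sel : List Int) (k : Int) :
    Nat → Int → Option Int
  | 0, _ => none
  | fuel + 1, step =>
    if step < k then
      if grb - step < 0 then none
      else if decide (grb - step < n) && spnCirLeftAltOk arr sel (grb - step) then some step
      else spnCirLeftAltLeft arr n grb sel k fuel (step + 1)
    else none

-- B's rightward scan: breaks at n
def spnCirLeftAltRight (arr : List String) (n grb : Int) (sel : List Int) (k : Int) :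
    Nat → Int → Option Int
  | 0, _ => none
  | fuel + 1, step =>
    if step < k then
      if grb + step ≥ n then none
      else if decide (0 ≤ grb + step) && spnCirLeftAltOk arr sel (grb + step) then some step
      else spnCirLeftAltRight arr n grb sel k fuel (step + 1)
    else none

def spnCirLeft_alt (arr : List String) (grb : Int) (k : Int) (selectedPassenger : List Int) : Int :=
  let n : Int := arr.length
  match spnCirLeftAltLeft arr n grb selectedPassenger k (k - 1).toNat 1,
        spnCirLeftAltRight arr n grb selectedPassenger k (k - 1).toNat 1 with
  | some l, some r => if l ≤ r then grb - l else grb + r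
  | some l, none => grb - l
  | none, some r => grb + r
  | none, none => grb

-- ===== PRECONDITION & SPEC =====
def Spec_spnCirLeft (arr : List String) (grb : Int) (k : Int) (selectedPassenger : List Int) (out : Int) : Prop := out = spnCirLeft_alt arr grb k selectedPassenger
instance (arr : List String) (grb : Int) (k : Int) (selectedPassenger : List Int) (out : Int) : Decidable (Spec_spnCirLeft arr grb k selectedPassenger out) := by unfold Spec_spnCirLeft; infer_instance

-- ===== CLAIM (what is proved, stated in full; the proofs are below) =====
def Claim_equal_spnCirLeft : Prop := ∀ (arr : List String) (grb : Int) (k : Int) (selectedPassenger : List Int), Dom_spnCirLeft arr grb k selectedPassenger → Spec_spnCirLeft arr grb k selectedPassenger (spnCirLeft arr grb k selectedPassenger)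

-- ===== LEMMAS AND PROOFS =====

-- proof-side predicate: position pnt is in range and a free passenger seat
def pvGood (arr : List String) (n : Int) (sel : List Int) (pnt : Int) : Bool :=
  decide (0 ≤ pnt ∧ pnt < n) && spnCirLeftAltOk arr sel pnt

-- one attempt of A's inner loop at position pnt
def pvATry (arr : List String) (n : Int) (sel : List Int) (pnt : Int) : Option Int :=
  if pnt ≥ n ∨ pnt < 0 then none
  else
    match PySem.List.pyGet? arr pnt with
    | some s =>
      if PySem.Str.lower s == PySem.Str.lower "P" && !(sel.contains pnt) then some pnt else none
    | none => none

lemma inner_cons (arr : List String) (n grb : Int) (sel : List Int) (step d : Int)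
    (rest : List Int) :
    spnCirLeftInner arr n grb sel step (d :: rest) =
      (match pvATry arr n sel (grb + step * d) with
       | some p => some p
       | none => spnCirLeftInner arr n grb sel step rest) := by
  simp only [spnCirLeftInner, pvATry]
  by_cases h : (grb + step * d ≥ n ∨ grb + step * d < 0)
  · simp [h]
  · simp only [if_neg h]
    cases hg : PySem.List.pyGet? arr (grb + step * d) with
    | none => rfl
    | some s =>
      by_cases hp : PySem.Str.lower s = PySem.Str.lower "P" ∧ grb + step * d ∉ sel
      · simp [hp]
      · simp [hp]

lemma try_good (arr : List String) (n : Int) (sel : List Int) (pnt : Int) :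
    pvATry arr n sel pnt = (if pvGood arr n sel pnt then some pnt else none) := by
  have hP : PySem.Str.lower "P" = "p" := by decide
  simp only [pvATry, pvGood, spnCirLeftAltOk, hP]
  by_cases h : (pnt ≥ n ∨ pnt < 0)
  · have : decide (0 ≤ pnt ∧ pnt < n) = false := by simp; omega
    simp [h, this]
  · have : decide (0 ≤ pnt ∧ pnt < n) = true := by simp; omega
    simp only [if_neg h, this, Bool.true_and]
    cases hg : PySem.List.pyGet? arr pnt with
    | none => simp
    | some s => rfl

lemma inner_eq (arr : List String) (n grb : Int) (sel : List Int) (step : Int) :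
    spnCirLeftInner arr n grb sel step [-1, 1] =
      (if pvGood arr n sel (grb - step) then some (grb - step)
       else if pvGood arr n sel (grb + step) then some (grb + step) else none) := by
  have e1 : grb + step * (-1) = grb - step := by ring
  have e2 : grb + step * 1 = grb + step := by ring
  rw [inner_cons, inner_cons, e1, e2, try_good, try_good]
  by_cases h1 : pvGood arr n sel (grb - step) = true <;>
    by_cases h2 : pvGood arr n sel (grb + step) = true <;>
      simp [h1, h2, spnCirLeftInner]

-- combine function of B's final decision, lifted to Option
def pvCombine (grb : Int) : Option Int → Option Int → Option Int
  | some l, some r => some (if l ≤ r then grb - l else grb + r)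
  | some l, none => some (grb - l)
  | none, some r => some (grb + r)
  | none, none => none

lemma good_range {arr : List String} {n : Int} {sel : List Int} {pnt : Int}
    (h : pvGood arr n sel pnt = true) : 0 ≤ pnt ∧ pnt < n := by
  simp only [pvGood, Bool.and_eq_true, decide_eq_true_eq] at h
  exact h.1

lemma cond_left (arr : List String) (n : Int) (sel : List Int) (pnt : Int) (h : ¬ pnt < 0) :
    (decide (pnt < n) && spnCirLeftAltOk arr sel pnt) = pvGood arr n sel pnt := by
  unfold pvGood
  have : decide (0 ≤ pnt ∧ pnt < n) = decide (pnt < n) := by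
    by_cases hn : pnt < n <;> simp [hn] <;> omega
  rw [this]

lemma cond_right (arr : List String) (n : Int) (sel : List Int) (pnt : Int) (h : ¬ pnt ≥ n) :
    (decide (0 ≤ pnt) && spnCirLeftAltOk arr sel pnt) = pvGood arr n sel pnt := by
  unfold pvGood
  have : decide (0 ≤ pnt ∧ pnt < n) = decide (0 ≤ pnt) := by
    by_cases hz : 0 ≤ pnt <;> simp [hz] <;> omega
  rw [this]

lemma left_some_ge (arr : List String) (n grb : Int) (sel : List Int) (k : Int) :
    ∀ (m : Nat) (c l : Int),
      spnCirLeftAltLeft arr n grb sel k m c = some l → c ≤ l := by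
  intro m
  induction m with
  | zero => intro c l h; cases h
  | succ m ih =>
    intro c l h
    simp only [spnCirLeftAltLeft] at h
    split_ifs at h with hck h1 h2
    · injection h with h'
      omega
    · have := ih (c + 1) l h
      omega

lemma right_some_ge (arr : List String) (n grb : Int) (sel : List Int) (k : Int) :
    ∀ (m : Nat) (c r : Int),
      spnCirLeftAltRight arr n grb sel k m c = some r → c ≤ r := by
  intro m
  induction m with
  | zero => intro c r h; cases h
  | succ m ih =>
    intro c r h
    simp only [spnCirLeftAltRight] at h
    split_ifs at h with hck h1 h2
    · injection h with h'
      omega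
    · have := ih (c + 1) r h
      omega

lemma left_none_of_neg (arr : List String) (n grb : Int) (sel : List Int) (k : Int) (m : Nat)
    (c : Int) (h : grb - c < 0) : spnCirLeftAltLeft arr n grb sel k m c = none := by
  cases m with
  | zero => rfl
  | succ m =>
    simp only [spnCirLeftAltLeft]
    by_cases hck : c < k
    · simp [hck, h]
    · simp [hck]

lemma right_none_of_ge (arr : List String) (n grb : Int) (sel : List Int) (k : Int) (m : Nat)
    (c : Int) (h : grb + c ≥ n) : spnCirLeftAltRight arr n grb sel k m c = none := by
  cases m with
  | zero => rfl
  | succ m =>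
    simp only [spnCirLeftAltRight]
    by_cases hck : c < k
    · simp [hck, h]
    · simp [hck]

lemma main_eq (arr : List String) (n grb : Int) (sel : List Int) (k : Int) :
    ∀ (m : Nat) (c : Int),
      spnCirLeftOuter arr n grb sel k m c =
        pvCombine grb (spnCirLeftAltLeft arr n grb sel k m c)
                      (spnCirLeftAltRight arr n grb sel k m c) := by
  intro m
  induction m with
  | zero => intro c; rfl
  | succ m ih =>
    intro c
    by_cases hck : c < k
    · simp only [spnCirLeftOuter, spnCirLeftAltLeft, spnCirLeftAltRight, if_pos hck, inner_eq]
      by_cases hgl : pvGood arr n sel (grb - c) = true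
      · have hrange := good_range hgl
        have hnotneg : ¬ grb - c < 0 := by omega
        rw [cond_left arr n sel (grb - c) hnotneg]
        simp only [hgl, if_true, if_neg hnotneg]
        by_cases hcr : grb + c ≥ n
        · simp [hcr, pvCombine]
        · rw [if_neg hcr, cond_right arr n sel (grb + c) hcr]
          by_cases hgr : pvGood arr n sel (grb + c) = true
          · simp [hgr, pvCombine]
          · simp only [hgr, Bool.false_eq_true, if_false]
            cases hr : spnCirLeftAltRight arr n grb sel k m (c + 1) with
            | none => simp [pvCombine]
            | some r =>
              have hrge : c + 1 ≤ r := right_some_ge arr n grb sel k m (c + 1) r hr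
              simp only [pvCombine, Option.some.injEq]
              rw [if_pos (by omega)]
      · by_cases hgr : pvGood arr n sel (grb + c) = true
        · have hrange := good_range hgr
          have hnotge : ¬ grb + c ≥ n := by omega
          rw [cond_right arr n sel (grb + c) hnotge]
          simp only [hgl, Bool.false_eq_true, if_false, hgr, if_true, if_neg hnotge]
          by_cases hcl : grb - c < 0
          · simp [hcl, pvCombine]
          · rw [if_neg hcl, cond_left arr n sel (grb - c) hcl]
            simp only [hgl, Bool.false_eq_true, if_false]
            cases hl : spnCirLeftAltLeft arr n grb sel k m (c + 1) with
            | none => simp [pvCombine]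
            | some l =>
              have hlge : c + 1 ≤ l := left_some_ge arr n grb sel k m (c + 1) l hl
              simp only [pvCombine, Option.some.injEq]
              rw [if_neg (by omega)]
        · simp only [hgl, hgr, Bool.false_eq_true, if_false]
          rw [ih (c + 1)]
          by_cases hcl : grb - c < 0
          · have hl2 := left_none_of_neg arr n grb sel k m (c + 1) (by omega)
            rw [if_pos hcl, hl2]
            by_cases hcr : grb + c ≥ n
            · have hr2 := right_none_of_ge arr n grb sel k m (c + 1) (by omega)
              rw [if_pos hcr, hr2]
            · rw [if_neg hcr, cond_right arr n sel (grb + c) hcr]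
              simp [hgr]
          · rw [if_neg hcl, cond_left arr n sel (grb - c) hcl]
            simp only [hgl, Bool.false_eq_true, if_false]
            by_cases hcr : grb + c ≥ n
            · have hr2 := right_none_of_ge arr n grb sel k m (c + 1) (by omega)
              rw [if_pos hcr, hr2]
            · rw [if_neg hcr, cond_right arr n sel (grb + c) hcr]
              simp [hgr]
    · simp only [spnCirLeftOuter, spnCirLeftAltLeft, spnCirLeftAltRight, if_neg hck]
      rfl

-- ===== VERDICT (by name: the statement is the Claim_ definition above) =====
theorem spnCirLeft_spec : Claim_equal_spnCirLeft := by
  intro arr grb k sel _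
  show (spnCirLeftOuter arr (arr.length : Int) grb sel k (k - 1).toNat 1).getD grb =
    (match spnCirLeftAltLeft arr (arr.length : Int) grb sel k (k - 1).toNat 1,
           spnCirLeftAltRight arr (arr.length : Int) grb sel k (k - 1).toNat 1 with
     | some l, some r => if l ≤ r then grb - l else grb + r
     | some l, none => grb - l
     | none, some r => grb + r
     | none, none => grb)
  rw [main_eq]
  cases hl : spnCirLeftAltLeft arr (arr.length : Int) grb sel k (k - 1).toNat 1 <;>
    cases hr : spnCirLeftAltRight arr (arr.length : Int) grb sel k (k - 1).toNat 1 <;>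
      simp [pvCombine]
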